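-- pv_equiv track=rewrite | github.com/leeping/nanoreactor | src/nanoreactor.py | formulaSum
-- ===== SOURCE A (Python) =====
-- from collections import namedtuple, OrderedDict, defaultdict, Counter
--
-- def formulaSum(efList):
--     """ Takes a list of empirical formulas such as ['H2O', 'H2O', 'CH4'] and returns '2H2O+CH4'. """
--     count = Counter(efList)
--     words = []
--     for v in sorted(list(set(count.values())))[::-1]:
--         for k, v1 in list(count.items()):
--             if v == v1:
--                 if v == 1:
--                     words.append(k)
--                 else:
--                     words.append('%i%s' % (v, k))
--     return '+'.join(words)
-- ===== SOURCE B (Python) =====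
-- from collections import Counter
--
-- def formulaSum(efList):
--     count = Counter(efList)
--     words = [k if v == 1 else '%i%s' % (v, k)
--              for k, v in sorted(count.items(), key=lambda kv: -kv[1])]
--     return '+'.join(words)
-- ===== Notes on version B (the rewrite author's own statement) =====
-- stated objective: simpler
-- what changed: A loops over the sorted distinct count values descending and rescans all counter items for each value; B performs one stable sort of the counter items on descending count and formats them in a single pass.
import Mathlib
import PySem

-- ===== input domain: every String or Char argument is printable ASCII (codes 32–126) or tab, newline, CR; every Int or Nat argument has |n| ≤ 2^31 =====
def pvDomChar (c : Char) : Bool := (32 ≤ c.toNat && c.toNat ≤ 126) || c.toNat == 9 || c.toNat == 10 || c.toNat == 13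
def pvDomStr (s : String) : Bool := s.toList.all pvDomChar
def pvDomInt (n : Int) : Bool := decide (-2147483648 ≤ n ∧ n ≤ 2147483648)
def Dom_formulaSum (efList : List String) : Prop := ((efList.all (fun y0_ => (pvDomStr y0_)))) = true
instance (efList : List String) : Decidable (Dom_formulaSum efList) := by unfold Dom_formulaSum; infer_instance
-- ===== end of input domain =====

-- B replaces A's loop over sorted distinct counts with inner rescans by one stable sort of the
-- counter's items on descending count (objective: simpler).

-- ===== PORT A =====
def formulaSum (efList : List String) : String :=
  let count := PySem.Dict.counter efList
  -- sorted(list(set(count.values())))[::-1]  (slice? with step -1 never fails)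
  let vsDesc := (PySem.List.slice? (PySem.List.sorted (PySem.Set.ofList count.values) (fun x => x) false) none none (-1)).getD []
  let words := vsDesc.foldl (fun words v =>
    count.items.foldl (fun words kv =>
      if v = kv.2 then
        words ++ [if v = 1 then kv.1 else PySem.Int.toStr v ++ kv.1]
      else words) words) []
  PySem.Str.join "+" words

-- ===== PORT B =====
def formulaSum_alt (efList : List String) : String :=
  let count := PySem.Dict.counter efList
  let words := (PySem.List.sorted count.items (fun kv => -kv.2) false).map
      (fun kv => if kv.2 = 1 then kv.1 else PySem.Int.toStr kv.2 ++ kv.1)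
  PySem.Str.join "+" words

-- ===== PRECONDITION & SPEC =====
def Spec_formulaSum (efList : List String) (out : String) : Prop := out = formulaSum_alt efList
instance (efList : List String) (out : String) : Decidable (Spec_formulaSum efList out) := by unfold Spec_formulaSum; infer_instance

-- ===== CLAIM (what is proved, stated in full; the proofs are below) =====
def Claim_equal_formulaSum : Prop := ∀ (efList : List String), Dom_formulaSum efList → Spec_formulaSum efList (formulaSum efList)

-- ===== LEMMAS AND PROOFS =====

-- insertBy passes over a prefix it is not 'before'
theorem pv_insertBy_skip {α : Type} (b : α → α → Bool) (x : α) (l₁ l₂ : List α)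
    (h : ∀ y ∈ l₁, b x y = false) :
    PySem.List.insertBy b x (l₁ ++ l₂) = l₁ ++ PySem.List.insertBy b x l₂ := by
  induction l₁ with
  | nil => simp
  | cons y ys ih =>
    have hy := h y (by simp)
    simp [PySem.List.insertBy, hy, ih (fun z hz => h z (by simp [hz]))]

-- insertBy goes to the front when it is 'before' everything
theorem pv_insertBy_front {α : Type} (b : α → α → Bool) (x : α) (l : List α)
    (h : ∀ y ∈ l, b x y = true) :
    PySem.List.insertBy b x l = x :: l := by
  cases l with
  | nil => simp [PySem.List.insertBy]
  | cons y ys => simp [PySem.List.insertBy, h y (by simp)]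

theorem pv_sorted_snoc {α κ : Type} [LT κ] [DecidableLT κ] (l : List α) (x : α) (key : α → κ) :
    PySem.List.sorted (l ++ [x]) key false
      = PySem.List.insertBy (fun a b => decide (key a < key b)) x (PySem.List.sorted l key false) := by
  rw [PySem.List.sorted_eq_foldl_insertBy, PySem.List.sorted_eq_foldl_insertBy, List.foldl_append]
  simp

theorem pv_flatMap_congr {α β : Type} (l : List α) (f g : α → List β)
    (h : ∀ x ∈ l, f x = g x) : l.flatMap f = l.flatMap g := by
  induction l with
  | nil => rfl
  | cons x xs ih =>
    simp [List.flatMap_cons, h x (by simp), ih (fun z hz => h z (by simp [hz]))]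

theorem pv_insert_into_blocks (x : String × Int) (l : List (String × Int)) (vs : List Int)
    (hvs : vs.Pairwise (· > ·)) (hx : x.2 ∈ vs) :
    PySem.List.insertBy (fun a b => decide ((fun kv : String × Int => -kv.2) a < (fun kv : String × Int => -kv.2) b)) x
        (vs.flatMap (fun v => l.filter (fun kv => v = kv.2)))
      = vs.flatMap (fun v => (l ++ [x]).filter (fun kv => v = kv.2)) := by
  induction vs with
  | nil => cases hx
  | cons v rest ih =>
    rcases List.pairwise_cons.mp hvs with ⟨hv, hrest⟩
    have hblock : ∀ y ∈ l.filter (fun kv => decide (v = kv.2)), y.2 = v := by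
      intro y hy
      have h2 := List.of_mem_filter hy
      have h3 : v = y.2 := of_decide_eq_true h2
      exact h3.symm
    by_cases hxv : x.2 = v
    · -- x belongs at the end of the v-block
      have hskip : ∀ y ∈ l.filter (fun kv => decide (v = kv.2)),
          (decide ((-x.2 : Int) < -y.2)) = false := by
        intro y hy; rw [hblock y hy, hxv]; simp
      have hfront : ∀ y ∈ rest.flatMap (fun v => l.filter (fun kv => v = kv.2)),
          (decide ((-x.2 : Int) < -y.2)) = true := by
        intro y hy
        rcases List.mem_flatMap.mp hy with ⟨u, hu, hyu⟩
        have h2 : u = y.2 := of_decide_eq_true (List.mem_filter.mp hyu).2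
        have : y.2 < x.2 := by rw [← h2, hxv]; exact hv u hu
        simpa using this
      simp only [List.flatMap_cons]
      rw [pv_insertBy_skip _ _ _ _ hskip, pv_insertBy_front _ _ _ hfront]
      have hrestsame : rest.flatMap (fun v => (l ++ [x]).filter (fun kv => v = kv.2))
          = rest.flatMap (fun v => l.filter (fun kv => v = kv.2)) := by
        apply pv_flatMap_congr
        intro u hu
        have hgt := hv u hu
        have hne : ¬ (u = x.2) := by omega
        simp [List.filter_append, hne]
      rw [hrestsame, List.filter_append]
      simp [hxv]
    · -- x's value is smaller than v: skip the whole v-block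
      have hx' : x.2 ∈ rest := by cases List.mem_cons.mp hx with
        | inl h => exact absurd h hxv
        | inr h => exact h
      have hlt : x.2 < v := hv _ hx'
      have hskip : ∀ y ∈ l.filter (fun kv => decide (v = kv.2)),
          (decide ((-x.2 : Int) < -y.2)) = false := by
        intro y hy; rw [hblock y hy]; simp; omega
      simp only [List.flatMap_cons]
      rw [pv_insertBy_skip _ _ _ _ hskip, ih hrest hx']
      rw [List.filter_append]
      have : ¬ (v = x.2) := by omega
      simp [this]

-- the stable sort on descending count equals concatenation of the per-count filters
theorem pv_stable_decomp (l : List (String × Int)) (vs : List Int)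
    (hvs : vs.Pairwise (· > ·)) (hmem : ∀ x ∈ l, x.2 ∈ vs) :
    PySem.List.sorted l (fun kv => -kv.2) false
      = vs.flatMap (fun v => l.filter (fun kv => v = kv.2)) := by
  induction l using List.reverseRecOn with
  | nil => rw [PySem.List.sorted_eq_foldl_insertBy]; simp
  | append_singleton l x ih =>
    rw [pv_sorted_snoc, ih (fun y hy => hmem y (by simp [hy]))]
    exact pv_insert_into_blocks x l vs hvs (hmem x (by simp))

-- the common formatting of one counter item
def pvFmt (kv : String × Int) : String := if kv.2 = 1 then kv.1 else PySem.Int.toStr kv.2 ++ kv.1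

theorem pv_foldl_append {α β : Type} (l : List α) (f : α → List β) :
    ∀ acc : List β, l.foldl (fun a x => a ++ f x) acc = acc ++ l.flatMap f := by
  induction l with
  | nil => simp
  | cons x xs ih => intro acc; simp [ih]

theorem pv_innerA (items : List (String × Int)) (ws : List String) (v : Int) :
    items.foldl (fun words kv =>
        if v = kv.2 then words ++ [if v = 1 then kv.1 else PySem.Int.toStr v ++ kv.1]
        else words) ws
      = ws ++ ((items.filter (fun kv => v = kv.2)).map pvFmt) := by
  rw [PySem.List.foldl_append_ite (fun kv : String × Int => v = kv.2)
      (fun kv : String × Int => if v = 1 then kv.1 else PySem.Int.toStr v ++ kv.1)]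
  congr 1
  apply List.map_congr_left
  intro kv hkv
  have hv : v = kv.2 := of_decide_eq_true (List.mem_filter.mp hkv).2
  simp [pvFmt, ← hv]

theorem pv_wordsA (items : List (String × Int)) (vsDesc : List Int) : ∀ acc : List String,
    vsDesc.foldl (fun words v =>
      items.foldl (fun words kv =>
        if v = kv.2 then words ++ [if v = 1 then kv.1 else PySem.Int.toStr v ++ kv.1]
        else words) words) acc
    = acc ++ (vsDesc.flatMap (fun v => items.filter (fun kv => v = kv.2))).map pvFmt := by
  intro acc
  simp only [pv_innerA]
  rw [pv_foldl_append]
  simp [List.map_flatMap]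

-- ===== VERDICT (by name: the statement is the Claim_ definition above) =====
theorem formulaSum_spec : Claim_equal_formulaSum := by
  intro efList _
  unfold Spec_formulaSum formulaSum formulaSum_alt
  simp only [PySem.List.slice?_none_none_neg_one, Option.getD_some]
  rw [pv_wordsA, List.nil_append]
  rw [pv_stable_decomp ((PySem.Dict.counter efList).items)
        ((PySem.List.sorted (PySem.Set.ofList (PySem.Dict.counter efList).values) (fun x => x) false).reverse)
        (by
          rw [List.pairwise_reverse]
          exact PySem.List.sorted_ofList_pairwise_lt ((PySem.Dict.counter efList).values))
        (by
          intro kv hkv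
          simp only [List.mem_reverse, PySem.List.mem_sorted, PySem.Set.mem_ofList,
            PySem.Dict.values, List.mem_map]
          exact ⟨kv, hkv, rfl⟩)]
  rfl
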